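-- pv_equiv track=rewrite | github.com/Kevinvincentals/smartgliding-ogn-backend | services/flight_events.py | is_tow_plane
-- ===== SOURCE A (Python) =====
-- TOW_PLANE_MODELS = [
--     "PA-25", "PAWNEE", "RALLYE", "DR-400", "ROBIN", "MAULE", "CUB", "WILGA", "HUSKY",
--     "SUPER CUB", "SCOUT", "CITABRIA", "CESSNA", "PIPER"
-- ]
--
-- def is_tow_plane(aircraft_type, aircraft_model):
--     """Determine if this is a tow plane based on type and model"""
--     # Check by APRS aircraft type first
--     if aircraft_type in ["Drop plane/Powered aircraft"]:
--         return True
--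
--     # Check by model name
--     if aircraft_model:
--         aircraft_model = aircraft_model.upper()
--         for model_part in TOW_PLANE_MODELS:
--             if model_part.upper() in aircraft_model:
--                 return True
--
--     return False
-- ===== SOURCE B (Python) =====
-- TOW_PLANE_MODELS = [
--     "PA-25", "PAWNEE", "RALLYE", "DR-400", "ROBIN", "MAULE", "CUB", "WILGA", "HUSKY",
--     "SUPER CUB", "SCOUT", "CITABRIA", "CESSNA", "PIPER"
-- ]
--
-- # A trie (first-child / next-sibling encoding) of the uppercased patterns, built once:
-- # matching walks the shared-prefix tree character by character instead of running a
-- # separate substring search per pattern.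
--
-- def _insert(t, word):
--     if not word:
--         return t
--     c, rest = word[0], word[1:]
--     if t is None:
--         return (c, not rest, _insert(None, rest), None)
--     tc, acc, child, sib = t
--     if tc == c:
--         if rest:
--             return (tc, acc, _insert(child, rest), sib)
--         return (tc, True, child, sib)
--     return (tc, acc, child, _insert(sib, word))
--
-- _TRIE = None
-- for _p in TOW_PLANE_MODELS:
--     _TRIE = _insert(_TRIE, _p.upper())
--
--
-- def _member(t, l, i):
--     """True iff some pattern stored in trie t is a prefix of l[i:]."""
--     if t is None:
--         return False
--     c, acc, child, sib = t
--     if i < len(l) and l[i] == c and (acc or _member(child, l, i + 1)):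
--         return True
--     return _member(sib, l, i)
--
--
-- def is_tow_plane(aircraft_type, aircraft_model):
--     """Determine if this is a tow plane based on type and model"""
--     if aircraft_type == "Drop plane/Powered aircraft":
--         return True
--     if aircraft_model:
--         u = aircraft_model.upper()
--         return any(_member(_TRIE, u, i) for i in range(len(u)))
--     return False
-- ===== Notes on version B (the rewrite author's own statement) =====
-- stated objective: alternative
-- what changed: Replaces A's per-pattern substring-search loop (one 'in' scan per tow-plane model) with a trie of the uppercased models built once (first-child/next-sibling encoding) that is walked character-by-character from each start position, matching all patterns simultaneously along shared prefixes.
import Mathlib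
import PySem

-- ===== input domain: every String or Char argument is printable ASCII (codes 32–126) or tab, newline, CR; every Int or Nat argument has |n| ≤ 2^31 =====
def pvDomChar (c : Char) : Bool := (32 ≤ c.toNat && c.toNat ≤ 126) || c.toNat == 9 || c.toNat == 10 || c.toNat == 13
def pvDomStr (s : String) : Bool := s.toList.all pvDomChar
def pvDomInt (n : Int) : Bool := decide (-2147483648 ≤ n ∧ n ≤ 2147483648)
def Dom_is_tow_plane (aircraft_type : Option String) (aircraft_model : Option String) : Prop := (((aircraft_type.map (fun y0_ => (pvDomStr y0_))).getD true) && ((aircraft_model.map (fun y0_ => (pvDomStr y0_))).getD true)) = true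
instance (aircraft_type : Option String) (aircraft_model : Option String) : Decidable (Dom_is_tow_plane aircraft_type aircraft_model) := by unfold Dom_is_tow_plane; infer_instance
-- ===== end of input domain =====

-- B replaces A's per-pattern substring-search loop by a trie of the uppercased models,
-- built once and walked character by character from each start position
-- (objective: alternative; no speed claim).

-- ===== PORT A =====
def TOW_PLANE_MODELS : List String :=
  ["PA-25", "PAWNEE", "RALLYE", "DR-400", "ROBIN", "MAULE", "CUB", "WILGA", "HUSKY",
   "SUPER CUB", "SCOUT", "CITABRIA", "CESSNA", "PIPER"]

def is_tow_plane (aircraft_type : Option String) (aircraft_model : Option String) : Bool :=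
  -- `aircraft_type in ["Drop plane/Powered aircraft"]`
  if [(some "Drop plane/Powered aircraft" : Option String)].contains aircraft_type then true
  else
    match aircraft_model with
    | none => false
    | some s =>
      if s.toList.isEmpty then false   -- `if aircraft_model:` falsy on ""
      else
        -- aircraft_model = aircraft_model.upper(); for model_part in …: if model_part.upper() in aircraft_model
        let u := PySem.Chars.upper s.toList
        TOW_PLANE_MODELS.any (fun mp => PySem.Chars.isIn (PySem.Chars.upper mp.toList) u)

-- ===== PORT B =====
-- first-child / next-sibling trie, exactly Source B's tuple encoding ((c, acc, child, sib) / None)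
inductive Trie where
  | nil : Trie
  | node : Char → Bool → Trie → Trie → Trie
deriving DecidableEq, Repr

-- Source B's _insert specialised to t = None: `(c, not rest, _insert(None, rest) if rest else None, None)`
-- (note `_insert(None, [])` is `None`, so the conditional collapses into the recursive call)
def trieFresh : List Char → Trie
  | [] => Trie.nil
  | c :: rest => Trie.node c rest.isEmpty (trieFresh rest) Trie.nil

-- Source B's _insert (the `t is None` branch is trieFresh; on `[]` it returns t unchanged)
def trieInsert : Trie → List Char → Trie
  | Trie.nil, w => trieFresh w
  | t, [] => t
  | Trie.node tc acc child sib, c :: rest =>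
      if tc == c then
        match rest with
        | [] => Trie.node tc true child sib
        | _ :: _ => Trie.node tc acc (trieInsert child rest) sib
      else
        Trie.node tc acc child (trieInsert sib (c :: rest))

-- _TRIE = fold of _insert over the uppercased models
def TOW_TRIE : Trie :=
  TOW_PLANE_MODELS.foldl (fun t p => trieInsert t (PySem.Chars.upper p.toList)) Trie.nil

-- Source B's _member; the index i into l is ported as the suffix l.drop i (exact here)
def trieMember : Trie → List Char → Bool
  | Trie.nil, _ => false
  | Trie.node c acc child sib, l =>
      (match l with
       | [] => false
       | x :: rest => x == c && (acc || trieMember child rest)) || trieMember sib l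

def is_tow_plane_alt (aircraft_type : Option String) (aircraft_model : Option String) : Bool :=
  if aircraft_type == some "Drop plane/Powered aircraft" then true
  else
    match aircraft_model with
    | none => false
    | some s =>
      if s.toList.isEmpty then false
      else
        let u := PySem.Chars.upper s.toList
        (List.range u.length).any (fun i => trieMember TOW_TRIE (u.drop i))

-- ===== PRECONDITION & SPEC =====
def Spec_is_tow_plane (aircraft_type : Option String) (aircraft_model : Option String) (out : Bool) : Prop := out = is_tow_plane_alt aircraft_type aircraft_model
instance (aircraft_type : Option String) (aircraft_model : Option String) (out : Bool) : Decidable (Spec_is_tow_plane aircraft_type aircraft_model out) := by unfold Spec_is_tow_plane; infer_instance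

-- ===== CLAIM (what is proved, stated in full; the proofs are below) =====
def Claim_equal_is_tow_plane : Prop := ∀ (aircraft_type : Option String) (aircraft_model : Option String), Dom_is_tow_plane aircraft_type aircraft_model → Spec_is_tow_plane aircraft_type aircraft_model (is_tow_plane aircraft_type aircraft_model)

-- ===== LEMMAS AND PROOFS =====

-- the (nonempty) words stored in a trie
def pats : Trie → List (List Char)
  | Trie.nil => []
  | Trie.node c acc child sib =>
      (if acc then [[c]] else []) ++ (pats child).map (c :: ·) ++ pats sib

lemma mem_pats_node {p : List Char} {c : Char} {acc : Bool} {child sib : Trie} :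
    p ∈ pats (Trie.node c acc child sib) ↔
      (acc = true ∧ p = [c]) ∨ (∃ q ∈ pats child, c :: q = p) ∨ p ∈ pats sib := by
  simp only [pats, List.mem_append, List.mem_map, List.mem_ite_nil_right, List.mem_singleton,
    or_assoc]

lemma pats_ne : ∀ (t : Trie), ∀ p ∈ pats t, p ≠ [] := by
  intro t
  induction t with
  | nil => simp [pats]
  | node c acc child sib ihc ihs =>
      intro p hp
      rcases mem_pats_node.mp hp with ⟨_, rfl⟩ | ⟨q, _, h⟩ | hp
      · simp
      · exact h ▸ (by simp)
      · exact ihs p hp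

lemma trieMember_iff (t : Trie) : ∀ l, trieMember t l = true ↔ ∃ p ∈ pats t, p <+: l := by
  induction t with
  | nil => intro l; simp [trieMember, pats]
  | node c acc child sib ihc ihs =>
      intro l
      cases l with
      | nil =>
          rw [show trieMember (Trie.node c acc child sib) [] = trieMember sib [] from by
                simp [trieMember],
              ihs]
          constructor
          · rintro ⟨p, hp, hpre⟩
            exact ⟨p, mem_pats_node.mpr (Or.inr (Or.inr hp)), hpre⟩
          · rintro ⟨p, hp, hpre⟩
            have := List.prefix_nil.mp hpre
            subst this
            rcases mem_pats_node.mp hp with ⟨_, h⟩ | ⟨q, _, h⟩ | hp'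
            · exact absurd h (by simp)
            · exact absurd h (by simp)
            · exact ⟨[], hp', List.nil_prefix⟩
      | cons x rest =>
          simp only [trieMember, Bool.or_eq_true, Bool.and_eq_true, beq_iff_eq, ihc, ihs]
          constructor
          · rintro (⟨rfl, hacc | ⟨q, hq, hpre⟩⟩ | ⟨p, hp, hpre⟩)
            · exact ⟨[x], mem_pats_node.mpr (Or.inl ⟨hacc, rfl⟩), by simp⟩
            · exact ⟨x :: q, mem_pats_node.mpr (Or.inr (Or.inl ⟨q, hq, rfl⟩)), by simpa using hpre⟩
            · exact ⟨p, mem_pats_node.mpr (Or.inr (Or.inr hp)), hpre⟩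
          · rintro ⟨p, hp, hpre⟩
            rcases mem_pats_node.mp hp with ⟨hacc, rfl⟩ | ⟨q, hq, hqp⟩ | hp'
            · rcases List.cons_prefix_cons.mp hpre with ⟨rfl, _⟩
              exact Or.inl ⟨rfl, Or.inl hacc⟩
            · subst hqp
              rcases List.cons_prefix_cons.mp hpre with ⟨rfl, hq'⟩
              exact Or.inl ⟨rfl, Or.inr ⟨q, hq, hq'⟩⟩
            · exact Or.inr ⟨p, hp', hpre⟩

def towPatterns : List (List Char) := TOW_PLANE_MODELS.map (fun p => PySem.Chars.upper p.toList)

-- the closed trie stores exactly the uppercased models (as a set)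
lemma pats_tow_sub : ∀ p ∈ pats TOW_TRIE, p ∈ towPatterns := by decide
lemma tow_pats_sub : ∀ p ∈ towPatterns, p ∈ pats TOW_TRIE := by decide

-- substring search by patterns equals the trie scan over start positions
lemma scan_eq (u : List Char) :
    TOW_PLANE_MODELS.any (fun mp => PySem.Chars.isIn (PySem.Chars.upper mp.toList) u)
      = (List.range u.length).any (fun i => trieMember TOW_TRIE (u.drop i)) := by
  rw [Bool.eq_iff_iff]
  simp only [List.any_eq_true, List.mem_range, trieMember_iff,
    ← PySem.Chars.exists_prefix_drop_iff_isIn]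
  constructor
  · rintro ⟨mp, hmp, j, hj⟩
    by_cases hlt : j < u.length
    · exact ⟨j, hlt, _, tow_pats_sub _ (by simp [towPatterns]; exact ⟨mp, hmp, rfl⟩), hj⟩
    · exfalso
      rw [List.drop_eq_nil_of_le (by omega)] at hj
      exact pats_ne _ _ (tow_pats_sub _ (by simp [towPatterns]; exact ⟨mp, hmp, rfl⟩))
        (List.prefix_nil.mp hj)
  · rintro ⟨i, _, p, hp, hpre⟩
    rcases List.mem_map.mp (pats_tow_sub p hp) with ⟨mp, hmp, rfl⟩
    exact ⟨mp, hmp, i, hpre⟩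

-- ===== VERDICT (by name: the statement is the Claim_ definition above) =====
theorem is_tow_plane_spec : Claim_equal_is_tow_plane := by
  intro t m _
  unfold Spec_is_tow_plane is_tow_plane is_tow_plane_alt
  have hguard : [(some "Drop plane/Powered aircraft" : Option String)].contains t
      = (t == some "Drop plane/Powered aircraft") := by
    simp only [List.contains_cons, List.contains_nil, Bool.or_false]
  rw [hguard]
  cases t == some "Drop plane/Powered aircraft" <;> simp only [if_true, if_false, Bool.false_eq_true]
  · cases m with
    | none => rfl
    | some s =>
      by_cases h : s.toList.isEmpty <;> simp [h, scan_eq]
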